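-- pv_equiv track=rewrite | github.com/ignaciocassi/PythonProgI | EjFinalFrases.py | obtenerDatosLineas
-- ===== SOURCE A (Python) =====
-- def obtenerDatosLineas(lineas):
--     """Para cada linea: quita los caracteres no alfabeticos, cuenta los caracteres mediante funcion recursiva y si son más de 3: verifica si existen en dicc
--     para contar sus repeticiones. """
--     datos=dict()
--     for i in range(len(lineas)):
--         linealimpia="".join([item for item in lineas[i] if item.isalpha()]) #Obtiene la cadena sin puntuacion
--         lineas[i]=linealimpia                                           #La reemplaza en la lista
--         caracteres=contarCaracteresRecursiva(lineas[i])                 #Cuenta los caract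
--         if caracteres>3:                                                #Si la palabra tiene más de 3 caracteres
--             if lineas[i] not in datos:
--                 datos[lineas[i]]=1
--             else:
--                 datos[lineas[i]]+=1
--     return datos
--
-- def contarCaracteresRecursiva(cadena,caracteres=0):
--     """Cuenta los caracteres de una palabra mediante un contador(caracteres) que se incrementa en cada ejecución de la función recursiva.
--     Caso base: caracteres es igual al largo de la cadena"""
--     if caracteres==len(cadena):
--         return caracteres
--     else:
--         caracteres+=1
--         return contarCaracteresRecursiva(cadena,caracteres)
-- ===== SOURCE B (Python) =====
-- def obtenerDatosLineas(lineas):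
--     """Limpia cada linea en el lugar; luego, en una segunda pasada, cuenta con
--     dict.get las palabras limpias de mas de 3 caracteres (len, sin recursion)."""
--     for i in range(len(lineas)):
--         lineas[i] = "".join(c for c in lineas[i] if c.isalpha())
--     datos = {}
--     for p in lineas:
--         if len(p) > 3:
--             datos[p] = datos.get(p, 0) + 1
--     return datos
-- ===== Notes on version B (the rewrite author's own statement) =====
-- stated objective: idiomatic
-- what changed: B splits A's single interleaved index loop into a cleaning pass over the list followed by a separate counting pass that uses len and dict.get(p, 0) + 1, dropping A's recursive character counter and the membership if/else.
import Mathlib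
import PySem

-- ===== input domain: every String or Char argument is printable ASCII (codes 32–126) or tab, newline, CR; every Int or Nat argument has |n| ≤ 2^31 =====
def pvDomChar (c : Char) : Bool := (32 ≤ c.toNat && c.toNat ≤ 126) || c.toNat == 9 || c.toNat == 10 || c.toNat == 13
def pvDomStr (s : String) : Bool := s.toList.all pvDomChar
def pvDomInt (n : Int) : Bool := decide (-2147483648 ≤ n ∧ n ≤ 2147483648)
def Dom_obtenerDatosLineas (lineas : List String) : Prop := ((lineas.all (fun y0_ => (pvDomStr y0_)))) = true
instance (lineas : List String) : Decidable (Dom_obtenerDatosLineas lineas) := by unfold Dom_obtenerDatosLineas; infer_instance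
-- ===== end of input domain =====

-- B replaces A's single interleaved index loop by a cleaning pass plus a separate counting pass
-- (len and dict.get(p, 0) + 1 instead of the recursive character counter and the membership if/else); idiomatic, not faster.
-- Both A and B mutate `lineas` in place identically (each line replaced by its cleaned form);
-- the equivalence proved here is about the RETURN value.

-- ===== PORT A =====
-- Python recursion: increments `caracteres` until it equals len(cadena).
-- The `else` fallback is unreachable from the initial call with 0 (Python diverges when caracteres > len).
def contarCaracteresRecursiva (cadena : List Char) (caracteres : Nat) : Nat :=
  if caracteres = cadena.length then caracteres
  else if caracteres < cadena.length then contarCaracteresRecursiva cadena (caracteres + 1)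
  else caracteres
termination_by cadena.length - caracteres

-- A reads lineas[i], writes the cleaned line back into lineas[i], and immediately uses it;
-- no other index is touched, so the loop over indices is transcribed as a fold over the elements.
def obtenerDatosLineas (lineas : List String) : List (String × Int) :=
  (lineas.foldl (fun (datos : PySem.Dict String Int) linea =>
      let linealimpia := String.mk (linea.toList.filter PySem.Chars.isalpha)
      let caracteres := contarCaracteresRecursiva linealimpia.toList 0
      if caracteres > 3 then
        if datos.contains linealimpia = false then
          datos.insert linealimpia 1
        else
          datos.insert linealimpia (datos.getD linealimpia 0 + 1)
      else datos)
    PySem.Dict.empty).items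

-- ===== PORT B =====
def obtenerDatosLineas_alt (lineas : List String) : List (String × Int) :=
  let limpias := lineas.map (fun l => String.mk (l.toList.filter PySem.Chars.isalpha))
  (limpias.foldl (fun (datos : PySem.Dict String Int) p =>
      if p.toList.length > 3 then
        datos.insert p (datos.getD p 0 + 1)
      else datos)
    PySem.Dict.empty).items

-- ===== PRECONDITION & SPEC =====
def Spec_obtenerDatosLineas (lineas : List String) (out : List (String × Int)) : Prop := out = obtenerDatosLineas_alt lineas
instance (lineas : List String) (out : List (String × Int)) : Decidable (Spec_obtenerDatosLineas lineas out) := by unfold Spec_obtenerDatosLineas; infer_instance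

-- ===== CLAIM (what is proved, stated in full; the proofs are below) =====
def Claim_equal_obtenerDatosLineas : Prop := ∀ (lineas : List String), Dom_obtenerDatosLineas lineas → Spec_obtenerDatosLineas lineas (obtenerDatosLineas lineas)

-- ===== LEMMAS AND PROOFS =====

-- The recursive counter returns the length (when started at or below it).
theorem contar_eq_length (cadena : List Char) : ∀ c, c ≤ cadena.length →
    contarCaracteresRecursiva cadena c = cadena.length := by
  intro c hc
  induction hn : cadena.length - c generalizing c with
  | zero =>
    have : c = cadena.length := by omega
    unfold contarCaracteresRecursiva; simp [this]
  | succ n ih =>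
    unfold contarCaracteresRecursiva
    have h1 : c ≠ cadena.length := by omega
    have h2 : c < cadena.length := by omega
    simp [h1, h2]
    exact ih (c + 1) (by omega) (by omega)

-- ===== VERDICT (by name: the statement is the Claim_ definition above) =====
theorem obtenerDatosLineas_spec : Claim_equal_obtenerDatosLineas := by
  intro lineas _
  unfold Spec_obtenerDatosLineas obtenerDatosLineas obtenerDatosLineas_alt
  have hcnt : ∀ (s : String), contarCaracteresRecursiva s.toList 0 = s.toList.length :=
    fun s => contar_eq_length s.toList 0 (Nat.zero_le _)
  -- A's loop body: the recursive counter is the length, and both branches of the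
  -- contains-test perform insert w (getD w 0 + 1)
  have hbodyA : (fun (datos : PySem.Dict String Int) (linea : String) =>
      let linealimpia := String.mk (linea.toList.filter PySem.Chars.isalpha)
      let caracteres := contarCaracteresRecursiva linealimpia.toList 0
      if caracteres > 3 then
        if datos.contains linealimpia = false then
          datos.insert linealimpia 1
        else
          datos.insert linealimpia (datos.getD linealimpia 0 + 1)
      else datos)
      = (fun (datos : PySem.Dict String Int) (linea : String) =>
          if (String.mk (linea.toList.filter PySem.Chars.isalpha)).toList.length > 3 then
            datos.insert (String.mk (linea.toList.filter PySem.Chars.isalpha))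
              (datos.getD (String.mk (linea.toList.filter PySem.Chars.isalpha)) 0 + 1)
          else datos) := by
    funext datos linea
    simp only [hcnt]
    by_cases h : (String.mk (linea.toList.filter PySem.Chars.isalpha)).toList.length > 3
    · rw [if_pos h, if_pos h]
      by_cases hc : datos.contains (String.mk (linea.toList.filter PySem.Chars.isalpha)) = false
      · rw [if_pos hc, PySem.Dict.getD_of_not_contains _ _ hc]; norm_num
      · rw [if_neg hc]
    · rw [if_neg h, if_neg h]
  rw [hbodyA]
  show _ = (List.foldl (fun (datos : PySem.Dict String Int) p =>
      if p.toList.length > 3 then datos.insert p (datos.getD p 0 + 1) else datos)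
      PySem.Dict.empty
      (lineas.map (fun l : String => String.mk (l.toList.filter PySem.Chars.isalpha)))).items
  rw [List.foldl_map]
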